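-- pv_equiv track=rewrite | github.com/tekcorman/standard-model-derivation | proofs/flavor/z3_holonomy_cycles.py | enumerate_cycles_at_vertex
-- ===== SOURCE A (Python) =====
-- def enumerate_cycles_at_vertex(adjacency, vertex, target_length):
--     """
--     Enumerate all simple cycles of exactly target_length through vertex.
--     Returns set of canonical cycle tuples (deduplicated by rotation/reflection).
--     """
--     cycles = set()
--
--     def dfs(path, visited):
--         current = path[-1]
--         depth = len(path)
--
--         if depth == target_length:
--             if vertex in adjacency[current]:
--                 cycle = tuple(path)
--                 n = len(cycle)
--                 # Canonical form: minimum over all rotations and reflections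
--                 reps = []
--                 for s in range(n):
--                     reps.append(tuple(cycle[(s + i) % n] for i in range(n)))
--                     reps.append(tuple(cycle[(s - i) % n] for i in range(n)))
--                 cycles.add(min(reps))
--             return
--
--         for w in adjacency[current]:
--             if w == vertex:
--                 continue
--             if w in visited:
--                 continue
--             path.append(w)
--             visited.add(w)
--             dfs(path, visited)
--             path.pop()
--             visited.discard(w)
--
--     dfs([vertex], {vertex})
--     return cycles
-- ===== SOURCE B (Python) =====
-- def enumerate_cycles_at_vertex(adjacency, vertex, target_length):
--     """
--     Enumerate all simple cycles of exactly target_length through vertex.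
--     Returns set of canonical cycle tuples (deduplicated by rotation/reflection).
--
--     Iterative re-implementation: instead of a recursive DFS with a mutable
--     path/visited pair, grow a frontier of partial paths level by level until
--     the paths are complete (or the frontier dies out), then close and
--     canonicalise each complete path.  Level-order expansion yields the
--     complete paths in the same lexicographic-choice order as the DFS.
--     """
--     frontier = [(vertex,)]
--     while frontier and len(frontier[0]) != target_length:
--         frontier = [p + (w,)
--                     for p in frontier
--                     for w in adjacency[p[-1]]
--                     if w != vertex and w not in p]
--
--     cycles = set()
--     for p in frontier:
--         if vertex in adjacency[p[-1]]:
--             n = len(p)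
--             reps = []
--             for s in range(n):
--                 reps.append(tuple(p[(s + i) % n] for i in range(n)))
--                 reps.append(tuple(p[(s - i) % n] for i in range(n)))
--             cycles.add(min(reps))
--     return cycles
-- ===== Notes on version B (the rewrite author's own statement) =====
-- stated objective: alternative
-- what changed: Replaces the recursive DFS with a mutable path/visited pair by an iterative level-by-level frontier expansion (a while loop of comprehension rounds over partial paths, 'w not in path' instead of a visited set) followed by a single closing/canonicalisation pass; the canonical-form code is unchanged.
import Mathlib
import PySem

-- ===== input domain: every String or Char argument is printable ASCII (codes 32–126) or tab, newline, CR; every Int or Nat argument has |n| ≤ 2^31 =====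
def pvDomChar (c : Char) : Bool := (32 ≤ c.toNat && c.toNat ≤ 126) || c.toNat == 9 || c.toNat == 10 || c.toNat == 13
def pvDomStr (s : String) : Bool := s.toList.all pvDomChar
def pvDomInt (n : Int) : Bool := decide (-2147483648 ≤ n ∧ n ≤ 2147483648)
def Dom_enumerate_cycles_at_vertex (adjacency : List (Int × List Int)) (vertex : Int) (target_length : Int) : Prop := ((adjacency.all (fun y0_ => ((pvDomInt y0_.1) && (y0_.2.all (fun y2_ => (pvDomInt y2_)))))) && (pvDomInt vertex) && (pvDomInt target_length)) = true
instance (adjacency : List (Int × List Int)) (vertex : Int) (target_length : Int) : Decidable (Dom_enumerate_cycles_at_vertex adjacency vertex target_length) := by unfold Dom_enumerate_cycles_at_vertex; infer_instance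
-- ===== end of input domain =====

-- B replaces A's recursive DFS (mutable path + visited set) by an iterative level-by-level
-- frontier expansion followed by one closing pass; the canonical-form code is kept identical.

-- adjacency[k] : first-match dict lookup; under Pre_ every key looked up is present, so the [] default is never used
def pvAdjGet (adjacency : List (Int × List Int)) (k : Int) : List Int :=
  (PySem.Dict.get? (PySem.Dict.mk adjacency) k).getD []

-- canonical form of a cycle: min over all rotations and reflections (identical code in A and B)
def pvCanon (path : List Int) : List Int :=
  let n : Int := (path.length : Int)
  let reps := (PySem.List.pyRange 0 n 1).foldl (fun reps s =>
      (reps ++ [(PySem.List.pyRange 0 n 1).map (fun i => PySem.List.pyGetD path (PySem.Int.mod (s + i) n) 0)])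
            ++ [(PySem.List.pyRange 0 n 1).map (fun i => PySem.List.pyGetD path (PySem.Int.mod (s - i) n) 0)]) []
  (PySem.List.min? reps (fun x => x)).getD []

-- ===== PORT A =====
-- A's recursive dfs; the fuel argument only makes the recursion structural: the real recursion
-- depth is at most max(target_length, 1) ≤ fuel at the top call, so fuel never reaches 0 there
-- (and when target_length < 1 every branch leaves `cycles` unchanged anyway).
def pvDfsA (adjacency : List (Int × List Int)) (vertex target_length : Int) :
    Nat → List Int → PySem.Set Int → List (List Int) → List (List Int)
  | 0, _, _, cycles => cycles
  | fuel + 1, path, visited, cycles =>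
    let current := PySem.List.pyGetD path (-1) 0          -- path[-1]; path is never empty
    if (path.length : Int) = target_length then
      if (pvAdjGet adjacency current).contains vertex then
        PySem.Set.add cycles (pvCanon path)
      else cycles
    else
      (pvAdjGet adjacency current).foldl (fun cycles w =>
        if w = vertex then cycles
        else if PySem.Set.contains visited w then cycles
        else pvDfsA adjacency vertex target_length fuel (path ++ [w]) (PySem.Set.add visited w) cycles) cycles

def enumerate_cycles_at_vertex (adjacency : List (Int × List Int)) (vertex : Int) (target_length : Int) : List (List Int) :=
  pvDfsA adjacency vertex target_length (target_length.toNat + 1) [vertex] (PySem.Set.ofList [vertex]) []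

-- ===== PORT B =====
-- one extension of one partial path: [p + (w,) for w in adjacency[p[-1]] if w != vertex and w not in p]
def pvExt (adjacency : List (Int × List Int)) (vertex : Int) (p : List Int) : List (List Int) :=
  ((pvAdjGet adjacency (PySem.List.pyGetD p (-1) 0)).filter
      (fun w => !(w == vertex) && !(p.contains w))).map (fun w => p ++ [w])

-- one frontier round (the comprehension over the whole frontier)
def pvStep (adjacency : List (Int × List Int)) (vertex : Int) (frontier : List (List Int)) : List (List Int) :=
  frontier.flatMap (pvExt adjacency vertex)

-- 'while frontier and len(frontier[0]) != target_length: frontier = <one round>'.  The fuel only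
-- makes the loop structural: frontier paths are duplicate-free lists over vertex and the listed
-- neighbours, so the loop runs at most max(target_length, |that universe| + 1) < fuel rounds at
-- the top call (proved below; with fuel exhausted the port would return the current frontier).
def pvLoop (adjacency : List (Int × List Int)) (vertex target_length : Int) :
    Nat → List (List Int) → List (List Int)
  | 0, frontier => frontier
  | fuel + 1, frontier =>
    match frontier with
    | [] => []
    | p :: rest =>
      if (p.length : Int) = target_length then p :: rest
      else pvLoop adjacency vertex target_length fuel (pvStep adjacency vertex (p :: rest))

-- closing pass body: if vertex in adjacency[p[-1]]: cycles.add(canonical form of p)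
def pvClose (adjacency : List (Int × List Int)) (vertex : Int) (cycles : List (List Int)) (p : List Int) : List (List Int) :=
  if (pvAdjGet adjacency (PySem.List.pyGetD p (-1) 0)).contains vertex then
    PySem.Set.add cycles (pvCanon p)
  else cycles

def enumerate_cycles_at_vertex_alt (adjacency : List (Int × List Int)) (vertex : Int) (target_length : Int) : List (List Int) :=
  let frontier := pvLoop adjacency vertex target_length
    (target_length.toNat + (adjacency.flatMap (·.2)).length + 2) [[vertex]]
  frontier.foldl (pvClose adjacency vertex) []

-- ===== PRECONDITION & SPEC =====
-- the vertices within k BFS steps of vertex (one step = all neighbours of the current set)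
def pvReach (adjacency : List (Int × List Int)) (vertex : Int) (k : Nat) : List Int :=
  (fun S => S ++ ((S.flatMap (pvAdjGet adjacency)).filter (fun w => !(S.contains w))))^[k] [vertex]

-- Pre_ = neither Python raises a KeyError: every vertex the search can reach — BFS distance at
-- most target_length - 1 from vertex (unbounded when target_length < 1; capped by |adjacency|,
-- past which reachability saturates) — has an adjacency entry.
def Pre_enumerate_cycles_at_vertex (adjacency : List (Int × List Int)) (vertex : Int) (target_length : Int) : Prop :=
  ∀ w ∈ pvReach adjacency vertex
      (if target_length < 1 then adjacency.length else min (target_length - 1).toNat adjacency.length),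
    w ∈ adjacency.map (·.1)
instance (adjacency : List (Int × List Int)) (vertex : Int) (target_length : Int) : Decidable (Pre_enumerate_cycles_at_vertex adjacency vertex target_length) := by unfold Pre_enumerate_cycles_at_vertex; infer_instance

def pvWitness_enumerate_cycles_at_vertex : (List (Int × List Int)) × Int × Int := ([(0, [1]), (1, [0])], 0, 2)

def Spec_enumerate_cycles_at_vertex (adjacency : List (Int × List Int)) (vertex : Int) (target_length : Int) (out : List (List Int)) : Prop := out = enumerate_cycles_at_vertex_alt adjacency vertex target_length
instance (adjacency : List (Int × List Int)) (vertex : Int) (target_length : Int) (out : List (List Int)) : Decidable (Spec_enumerate_cycles_at_vertex adjacency vertex target_length out) := by unfold Spec_enumerate_cycles_at_vertex; infer_instance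

-- ===== CLAIM (what is proved, stated in full; the proofs are below) =====
def Claim_equal_enumerate_cycles_at_vertex : Prop := ∀ (adjacency : List (Int × List Int)) (vertex : Int) (target_length : Int), Dom_enumerate_cycles_at_vertex adjacency vertex target_length → Pre_enumerate_cycles_at_vertex adjacency vertex target_length → Spec_enumerate_cycles_at_vertex adjacency vertex target_length (enumerate_cycles_at_vertex adjacency vertex target_length)

-- ===== LEMMAS AND PROOFS =====

-- the tree of complete paths below p after r extension rounds, in DFS (lexicographic-choice) order
def pvExpand (adjacency : List (Int × List Int)) (vertex : Int) : Nat → List Int → List (List Int)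
  | 0, p => [p]
  | r + 1, p => (pvExt adjacency vertex p).flatMap (pvExpand adjacency vertex r)

theorem pvStep_nil (adjacency : List (Int × List Int)) (vertex : Int) :
    pvStep adjacency vertex [] = [] := rfl

theorem pvStep_iterate (adjacency : List (Int × List Int)) (vertex : Int) (r : Nat) (fr : List (List Int)) :
    (pvStep adjacency vertex)^[r] fr = fr.flatMap (pvExpand adjacency vertex r) := by
  induction r generalizing fr with
  | zero => simp [pvExpand]
  | succ r ih =>
      rw [Function.iterate_succ_apply, ih]
      show (pvStep adjacency vertex fr).flatMap _ = _
      rw [pvStep, List.flatMap_assoc]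
      rfl

-- every path of the next frontier is one element longer
theorem pvStep_length (adjacency : List (Int × List Int)) (vertex : Int) (fr : List (List Int)) (L : Nat)
    (h : ∀ p ∈ fr, p.length = L) : ∀ q ∈ pvStep adjacency vertex fr, q.length = L + 1 := by
  intro q hq
  simp only [pvStep, pvExt, List.mem_flatMap, List.mem_map, List.mem_filter] at hq
  obtain ⟨p, hp, w, _, rfl⟩ := hq
  simp [h p hp]

-- when target_length < 1 the recursion never adds a cycle
theorem pvDfsA_neg (adjacency : List (Int × List Int)) (vertex target_length : Int)
    (hneg : target_length < 1) :
    ∀ (fuel : Nat) (path : List Int) (visited : PySem.Set Int) (cycles : List (List Int)),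
      path ≠ [] → pvDfsA adjacency vertex target_length fuel path visited cycles = cycles := by
  intro fuel
  induction fuel with
  | zero => intro path visited cycles _; rfl
  | succ fuel ih =>
      intro path visited cycles hpath
      rw [pvDfsA]
      have hne : ¬ ((path.length : Int) = target_length) := by
        have : 0 < path.length := List.length_pos_of_ne_nil hpath
        omega
      rw [if_neg hne]
      rw [PySem.List.foldl_congr_mem (g := fun (cycles : List (List Int)) _ => cycles)]
      · exact PySem.List.foldl_ignore _ _
      · intro acc w _
        split_ifs with h1 h2
        · rfl
        · rfl
        · exact ih (path ++ [w]) _ acc (by simp)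

-- every neighbour list produced by a lookup is part of the flattened adjacency values
theorem pvAdjGet_subset (adjacency : List (Int × List Int)) (k : Int) :
    pvAdjGet adjacency k ⊆ adjacency.flatMap (·.2) := by
  induction adjacency with
  | nil => simp [pvAdjGet, PySem.Dict.get?]
  | cons e rest ih =>
      intro w hw
      rw [pvAdjGet, PySem.Dict.get?_mk_cons] at hw
      by_cases hk : e.1 == k
      · rw [if_pos hk] at hw
        simp only [Option.getD_some] at hw
        simp [List.mem_flatMap]
        exact Or.inl hw
      · rw [if_neg hk] at hw
        have := ih hw
        simp only [List.flatMap_cons, List.mem_append]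
        exact Or.inr this

-- frontier paths are duplicate-free lists over vertex and the listed neighbours
def pvInv (adjacency : List (Int × List Int)) (vertex : Int) (L : Nat) (fr : List (List Int)) : Prop :=
  ∀ p ∈ fr, p.length = L ∧ p.Nodup ∧ p ⊆ vertex :: adjacency.flatMap (·.2)

theorem pvStep_inv (adjacency : List (Int × List Int)) (vertex : Int) (L : Nat) (fr : List (List Int))
    (h : pvInv adjacency vertex L fr) : pvInv adjacency vertex (L + 1) (pvStep adjacency vertex fr) := by
  intro q hq
  simp only [pvStep, pvExt, List.mem_flatMap, List.mem_map, List.mem_filter] at hq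
  obtain ⟨p, hp, w, ⟨hwadj, hwf⟩, rfl⟩ := hq
  obtain ⟨hlen, hnd, hsub⟩ := h p hp
  have hwnp : w ∉ p := by
    simp only [Bool.and_eq_true, Bool.not_eq_true'] at hwf
    simpa [List.contains_eq_mem] using hwf.2
  refine ⟨by simp [hlen], ?_, ?_⟩
  · simp only [List.nodup_append, List.nodup_singleton, true_and]
    refine ⟨hnd, ?_⟩
    intro a ha b hb
    simp only [List.mem_singleton] at hb
    subst hb
    intro he
    subst he
    exact hwnp ha
  · intro x hx
    rcases List.mem_append.mp hx with hx | hx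
    · exact hsub hx
    · simp only [List.mem_singleton] at hx
      subst hx
      exact List.mem_cons_of_mem _ (pvAdjGet_subset adjacency _ hwadj)

-- with target_length < 1 the while loop runs until the frontier dies out
-- a frontier whose paths would be longer than the universe is empty
theorem pvInv_nil (adjacency : List (Int × List Int)) (vertex : Int) (L : Nat) (fr : List (List Int))
    (hinv : pvInv adjacency vertex L fr) (hbig : (adjacency.flatMap (·.2)).length + 1 < L) :
    fr = [] := by
  match fr with
  | [] => rfl
  | p :: rest =>
      exfalso
      obtain ⟨hlen, hnd, hsub⟩ := hinv p List.mem_cons_self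
      have hle := (hnd.subperm hsub).length_le
      simp only [List.length_cons] at hle
      omega

theorem pvLoop_neg (adjacency : List (Int × List Int)) (vertex target_length : Int)
    (hneg : target_length < 1) :
    ∀ (fuel L : Nat) (fr : List (List Int)), pvInv adjacency vertex L fr → 1 ≤ L →
      (adjacency.flatMap (·.2)).length + 3 ≤ L + fuel →
      pvLoop adjacency vertex target_length fuel fr = [] := by
  intro fuel
  induction fuel with
  | zero =>
      intro L fr hinv _ hbound
      rw [pvInv_nil adjacency vertex L fr hinv (by omega)]
      rfl
  | succ fuel ih =>
      intro L fr hinv hL hbound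
      match fr with
      | [] => rfl
      | p :: rest =>
          rw [pvLoop]
          rw [if_neg (by rw [(hinv p List.mem_cons_self).1]; omega)]
          exact ih (L + 1) _ (pvStep_inv adjacency vertex L _ hinv) (by omega) (by omega)

theorem pvLoop_run (adjacency : List (Int × List Int)) (vertex target_length : Int) :
    ∀ (r fuel L : Nat) (fr : List (List Int)), (∀ p ∈ fr, p.length = L) →
      (L : Int) + r = target_length → r < fuel →
      pvLoop adjacency vertex target_length fuel fr = (pvStep adjacency vertex)^[r] fr := by
  intro r
  induction r with
  | zero =>
      intro fuel L fr hlen hL hfuel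
      obtain ⟨f, rfl⟩ : ∃ f, fuel = f + 1 := ⟨fuel - 1, by omega⟩
      match fr with
      | [] => rfl
      | p :: rest =>
          rw [pvLoop]
          rw [if_pos (by rw [hlen p (List.mem_cons_self)]; omega)]
          rfl
  | succ r ih =>
      intro fuel L fr hlen hL hfuel
      obtain ⟨f, rfl⟩ : ∃ f, fuel = f + 1 := ⟨fuel - 1, by omega⟩
      match fr with
      | [] => rw [Function.iterate_fixed (pvStep_nil adjacency vertex)]; rfl
      | p :: rest =>
          rw [pvLoop]
          rw [if_neg (by rw [hlen p (List.mem_cons_self)]; omega)]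
          rw [ih f (L + 1) _ (pvStep_length adjacency vertex _ L hlen) (by push_cast; omega) (by omega)]
          rw [← Function.iterate_succ_apply]

-- the main simulation: the recursive dfs on a partial path computes the closing fold over its expansion tree
theorem pvDfsA_expand (adjacency : List (Int × List Int)) (vertex target_length : Int) :
    ∀ (r fuel : Nat) (path : List Int) (visited : PySem.Set Int) (cycles : List (List Int)),
      r < fuel → path ≠ [] → (path.length : Int) + r = target_length →
      (∀ x, PySem.Set.contains visited x = path.contains x) →
      pvDfsA adjacency vertex target_length fuel path visited cycles =
        (pvExpand adjacency vertex r path).foldl (pvClose adjacency vertex) cycles := by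
  intro r
  induction r with
  | zero =>
      intro fuel path visited cycles hfuel _ hlen _
      obtain ⟨f, rfl⟩ : ∃ f, fuel = f + 1 := ⟨fuel - 1, by omega⟩
      rw [pvDfsA, if_pos (by omega)]
      rfl
  | succ r ih =>
      intro fuel path visited cycles hfuel hpath hlen hvis
      obtain ⟨f, rfl⟩ : ∃ f, fuel = f + 1 := ⟨fuel - 1, by omega⟩
      rw [pvDfsA]
      have hpos : 0 < path.length := List.length_pos_of_ne_nil hpath
      rw [if_neg (by omega)]
      show (pvAdjGet adjacency (PySem.List.pyGetD path (-1) 0)).foldl _ cycles = _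
      rw [pvExpand, List.foldl_flatMap, pvExt, List.foldl_map, ← PySem.List.foldl_if_eq_foldl_filter
        (p := fun w => !(w == vertex) && !(path.contains w))
        (f := fun cycles w => (pvExpand adjacency vertex r (path ++ [w])).foldl (pvClose adjacency vertex) cycles)]
      apply PySem.List.foldl_congr_mem
      intro acc w _
      by_cases h1 : w = vertex
      · simp [h1]
      · by_cases h2 : path.contains w
        · have hvp : w ∈ path := by simpa [List.contains_eq_mem] using h2
          have hv : w ∈ visited := by
            have h := hvis w; rw [h2] at h; simpa [List.contains_eq_mem] using h
          simp [h1, hv, hvp]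
        · have hnp : w ∉ path := by simpa [List.contains_eq_mem] using h2
          have hw : PySem.Set.contains visited w = false := by rw [hvis w]; simpa using h2
          have hnv : w ∉ visited := by simpa [List.contains_eq_mem] using hw
          have hrec := ih f (path ++ [w]) (PySem.Set.add visited w) acc
            (by omega) (by simp)
            (by simp only [List.length_append, List.length_cons, List.length_nil]; push_cast; push_cast at hlen; omega)
            (by
              intro x
              simp [PySem.Set.add, PySem.Set.contains, List.contains_eq_mem] at hw ⊢
              simp [PySem.Set.contains, List.contains_eq_mem] at hvis
              simp [hw, hvis x, Bool.or_comm])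
          have hadd : PySem.Set.add visited w = visited ++ [w] := by
            simp [PySem.Set.add, PySem.Set.contains, hnv]
          rw [hadd] at hrec
          simp [h1, hnv, hnp, hrec]

-- ===== VERDICT (by name: the statement is the Claim_ definition above) =====
theorem enumerate_cycles_at_vertex_spec : Claim_equal_enumerate_cycles_at_vertex := by
  intro adjacency vertex target_length _ _
  unfold Spec_enumerate_cycles_at_vertex enumerate_cycles_at_vertex enumerate_cycles_at_vertex_alt
  by_cases hneg : target_length < 1
  · rw [pvDfsA_neg adjacency vertex target_length hneg _ _ _ _ (by simp),
      pvLoop_neg adjacency vertex target_length hneg _ 1 _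
        (by intro p hp; simp at hp; subst hp; simp) (le_refl 1) (by omega)]
    rfl
  · have hpos : 1 ≤ target_length := by omega
    have hr : ((1 : Nat) : Int) + ((target_length - 1).toNat : Int) = target_length := by omega
    rw [pvLoop_run adjacency vertex target_length (target_length - 1).toNat _ 1 _
        (by intro p hp; simp at hp; subst hp; simp) hr (by omega),
      pvStep_iterate]
    simp only [List.flatMap_cons, List.flatMap_nil, List.append_nil]
    rw [pvDfsA_expand adjacency vertex target_length (target_length - 1).toNat _ _ _ _
        (by omega) (by simp) (by simp; omega)
        (by intro x; simp [PySem.Set.ofList, PySem.Set.add, PySem.Set.contains])]
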